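-- pv_equiv track=rewrite | github.com/andantecode/coding-test | 배낭/승형이의_사탕사기_28071.py | bfs
-- ===== SOURCE A (Python) =====
-- from collections import deque
--
-- def bfs(graph: list, depth):
--     visited = set(graph)
--     queue = deque(zip(graph, [1] * len(graph)))
--
--     while queue:
--         curr_item, curr_depth = queue.popleft()
--
--         if curr_depth >= depth:
--             break
--
--         for dx in graph:
--             if curr_item + dx not in visited:
--                 visited.add(curr_item + dx)
--                 queue.append((curr_item + dx, curr_depth + 1))
--
--     return visited
-- ===== SOURCE B (Python) =====
-- def bfs(graph: list, depth):
--     # level-synchronized frontier expansion instead of a deque of (item, depth) pairs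
--     visited = set(graph)
--     current = list(dict.fromkeys(graph))
--     level = 1
--     while current and level < depth:
--         nxt = []
--         for c in current:
--             for dx in graph:
--                 if c + dx not in visited:
--                     visited.add(c + dx)
--                     nxt.append(c + dx)
--         current = nxt
--         level += 1
--     return visited
-- ===== Notes on version B (the rewrite author's own statement) =====
-- stated objective: idiomatic
-- what changed: Replaced the deque of per-node (item, depth) tags with level-synchronized set expansion: a frontier set plus a level counter, so no tuples are queued and the break-on-depth test disappears.
import Mathlib
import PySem

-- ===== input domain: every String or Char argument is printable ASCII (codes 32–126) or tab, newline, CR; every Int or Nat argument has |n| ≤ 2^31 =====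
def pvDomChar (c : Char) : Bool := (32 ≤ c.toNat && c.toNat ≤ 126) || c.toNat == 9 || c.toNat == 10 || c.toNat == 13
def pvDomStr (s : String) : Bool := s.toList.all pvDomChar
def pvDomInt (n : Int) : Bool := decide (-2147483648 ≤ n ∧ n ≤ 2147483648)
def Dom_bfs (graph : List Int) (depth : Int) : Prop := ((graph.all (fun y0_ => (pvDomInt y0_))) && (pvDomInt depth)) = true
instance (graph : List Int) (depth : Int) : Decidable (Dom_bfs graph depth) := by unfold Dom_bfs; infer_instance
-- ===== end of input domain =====

-- B replaces A's deque of (item, depth) pairs by level-synchronized frontier-set expansion; return value only (A mutates nothing observable).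

-- ===== PORT A =====
-- one popped node (c, d): the inner 'for dx in graph' loop appending unseen sums
def bfsStep (graph : List Int) (c d : Int) (s : List (Int × Int) × List Int) :
    List (Int × Int) × List Int :=
  graph.foldl (fun s dx =>
    if c + dx ∈ s.2 then s
    else (s.1 ++ [(c + dx, d + 1)], s.2 ++ [c + dx])) s

-- the 'while queue' loop; the fuel is a guard only: it is proved sufficient on Dom (lemma bfsLoop_level below)
def bfsLoop (graph : List Int) (depth : Int) :
    Nat → List (Int × Int) → List Int → List Int
  | _, [], visited => visited
  | 0, _ :: _, visited => visited
  | fuel + 1, (c, d) :: q, visited =>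
    if depth ≤ d then visited
    else
      let s := bfsStep graph c d (q, visited)
      bfsLoop graph depth fuel s.1 s.2

def bfs (graph : List Int) (depth : Int) : List Int :=
  bfsLoop graph depth (graph.length + 2 ^ 64 + 3)
    (graph.zip (List.replicate graph.length 1)) (PySem.Set.ofList graph)

-- ===== PORT B =====
-- one frontier element c: the inner 'for dx in graph' loop, state = (nxt, visited)
def bfsGrow (graph : List Int) (c : Int) (s : List Int × List Int) : List Int × List Int :=
  graph.foldl (fun s dx =>
    if c + dx ∈ s.2 then s else (s.1 ++ [c + dx], s.2 ++ [c + dx])) s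

-- the 'while current and level < depth' loop
def bfsLoopB (graph : List Int) (depth : Int) (current visited : List Int) (level : Int) :
    List Int :=
  if current = [] ∨ depth ≤ level then visited
  else
    let s := current.foldl (fun s c => bfsGrow graph c s) ([], visited)
    bfsLoopB graph depth s.1 s.2 (level + 1)
termination_by (depth - level).toNat
decreasing_by rename_i h; rw [not_or] at h; omega

def bfs_alt (graph : List Int) (depth : Int) : List Int :=
  bfsLoopB graph depth (PySem.Set.ofList graph) (PySem.Set.ofList graph) 1

-- ===== PRECONDITION & SPEC =====
def Spec_bfs (graph : List Int) (depth : Int) (out : List Int) : Prop := out = bfs_alt graph depth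
instance (graph : List Int) (depth : Int) (out : List Int) : Decidable (Spec_bfs graph depth out) := by unfold Spec_bfs; infer_instance

-- ===== CLAIM (what is proved, stated in full; the proofs are below) =====
def Claim_equal_bfs : Prop := ∀ (graph : List Int) (depth : Int), Dom_bfs graph depth → Spec_bfs graph depth (bfs graph depth)

-- ===== LEMMAS AND PROOFS =====

theorem grow_cons (g : List Int) (dx c : Int) (s : List Int × List Int) :
    bfsGrow (dx :: g) c s =
      bfsGrow g c (if c + dx ∈ s.2 then s else (s.1 ++ [c + dx], s.2 ++ [c + dx])) := by
  simp only [bfsGrow, List.foldl_cons]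

theorem step_cons (g : List Int) (dx c d : Int) (s : List (Int × Int) × List Int) :
    bfsStep (dx :: g) c d s =
      bfsStep g c d (if c + dx ∈ s.2 then s else (s.1 ++ [(c + dx, d + 1)], s.2 ++ [c + dx])) := by
  simp only [bfsStep, List.foldl_cons]

theorem grow_shift (graph : List Int) (c : Int) :
    ∀ (n v : List Int), bfsGrow graph c (n, v) =
      (n ++ (bfsGrow graph c ([], v)).1, (bfsGrow graph c ([], v)).2) := by
  induction graph with
  | nil => intro n v; simp [bfsGrow]
  | cons dx g ih =>
    intro n v
    rw [grow_cons, grow_cons]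
    by_cases h : c + dx ∈ v
    · simp only [h, if_pos]
      exact ih n v
    · simp only [h, if_neg, not_false_iff]
      rw [ih (n ++ [c + dx]) (v ++ [c + dx]), ih ([] ++ [c + dx]) (v ++ [c + dx])]
      simp

theorem step_spec (graph : List Int) (c d : Int) :
    ∀ (q : List (Int × Int)) (v : List Int), bfsStep graph c d (q, v) =
      (q ++ (bfsGrow graph c ([], v)).1.map (fun x => (x, d + 1)), (bfsGrow graph c ([], v)).2) := by
  induction graph with
  | nil => intro q v; simp [bfsStep, bfsGrow]
  | cons dx g ih =>
    intro q v
    rw [step_cons, grow_cons]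
    by_cases h : c + dx ∈ v
    · simp only [h, if_pos]
      exact ih q v
    · simp only [h, if_neg, not_false_iff]
      rw [ih (q ++ [(c + dx, d + 1)]) (v ++ [c + dx]),
        grow_shift g c ([] ++ [c + dx]) (v ++ [c + dx])]
      simp

theorem grow_mono (graph : List Int) (c : Int) {x : Int} :
    ∀ (n v : List Int), x ∈ v → x ∈ (bfsGrow graph c (n, v)).2 := by
  induction graph with
  | nil => intro n v hx; exact hx
  | cons dx g ih =>
    intro n v hx
    rw [grow_cons]
    by_cases h : c + dx ∈ v
    · simp only [h, if_pos]; exact ih n v hx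
    · simp only [h, if_neg, not_false_iff]
      exact ih _ _ (by simp [hx])

theorem grow_covers (graph : List Int) (c : Int) {dx : Int} (hdx : dx ∈ graph) :
    ∀ (n v : List Int), c + dx ∈ (bfsGrow graph c (n, v)).2 := by
  induction graph with
  | nil => cases hdx
  | cons dy g ih =>
    intro n v
    rw [grow_cons]
    by_cases h2 : c + dy ∈ v
    · simp only [h2, if_pos]
      rcases List.mem_cons.1 hdx with h | h
      · exact grow_mono g c n v (h ▸ h2)
      · exact ih h n v
    · simp only [h2, if_neg, not_false_iff]
      rcases List.mem_cons.1 hdx with h | h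
      · exact grow_mono g c _ _ (by simp [h])
      · exact ih h _ _

theorem grow_idem (graph : List Int) (c : Int) (n v : List Int)
    (h : ∀ dx ∈ graph, c + dx ∈ v) : bfsGrow graph c (n, v) = (n, v) := by
  induction graph generalizing n v with
  | nil => rfl
  | cons dx g ih =>
    rw [grow_cons]
    simp only [h dx (by simp), if_pos]
    exact ih _ _ (fun dy hy => h dy (by simp [hy]))

theorem grow_sub (graph : List Int) (c : Int) (n v : List Int) :
    (∀ x ∈ (bfsGrow graph c (n, v)).1, x ∈ n ∨ ∃ dx ∈ graph, x = c + dx) ∧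
    (∀ x ∈ (bfsGrow graph c (n, v)).2, x ∈ v ∨ ∃ dx ∈ graph, x = c + dx) := by
  induction graph generalizing n v with
  | nil => exact ⟨fun x hx => Or.inl hx, fun x hx => Or.inl hx⟩
  | cons dy g ih =>
    rw [grow_cons]
    by_cases h : c + dy ∈ v
    · simp only [h, if_pos]
      refine ⟨fun x hx => ?_, fun x hx => ?_⟩
      · rcases (ih n v).1 x hx with h1 | ⟨dx, hdx, rfl⟩
        · exact Or.inl h1
        · exact Or.inr ⟨dx, by simp [hdx]⟩
      · rcases (ih n v).2 x hx with h1 | ⟨dx, hdx, rfl⟩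
        · exact Or.inl h1
        · exact Or.inr ⟨dx, by simp [hdx]⟩
    · simp only [h, if_neg, not_false_iff]
      refine ⟨fun x hx => ?_, fun x hx => ?_⟩
      · rcases (ih _ _).1 x hx with h1 | ⟨dx, hdx, rfl⟩
        · rcases List.mem_append.1 h1 with h2 | h2
          · exact Or.inl h2
          · exact Or.inr ⟨dy, by simp, by simpa using h2⟩
        · exact Or.inr ⟨dx, by simp [hdx]⟩
      · rcases (ih _ _).2 x hx with h1 | ⟨dx, hdx, rfl⟩
        · rcases List.mem_append.1 h1 with h2 | h2
          · exact Or.inl h2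
          · exact Or.inr ⟨dy, by simp, by simpa using h2⟩
        · exact Or.inr ⟨dx, by simp [hdx]⟩

theorem grow_len (graph : List Int) (c : Int) (n v : List Int) :
    (bfsGrow graph c (n, v)).2.length + n.length = (bfsGrow graph c (n, v)).1.length + v.length := by
  induction graph generalizing n v with
  | nil => simp [bfsGrow]; omega
  | cons dx g ih =>
    rw [grow_cons]
    by_cases h : c + dx ∈ v
    · simp only [h, if_pos]; exact ih n v
    · simp only [h, if_neg, not_false_iff]
      have := ih (n ++ [c + dx]) (v ++ [c + dx])
      simp at this ⊢
      omega

theorem grow_vis_mono (graph : List Int) (c : Int) :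
    ∀ (n v : List Int), v.length ≤ (bfsGrow graph c (n, v)).2.length := by
  induction graph with
  | nil => intro n v; exact Nat.le_refl _
  | cons dx g ih =>
    intro n v
    rw [grow_cons]
    by_cases h : c + dx ∈ v
    · simp only [h, if_pos]; exact ih n v
    · simp only [h, if_neg, not_false_iff]
      calc v.length ≤ (v ++ [c + dx]).length := by simp
        _ ≤ _ := ih _ _

theorem grow_nodup (graph : List Int) (c : Int) (n v : List Int) (h : v.Nodup) :
    (bfsGrow graph c (n, v)).2.Nodup := by
  induction graph generalizing n v with
  | nil => exact h
  | cons dx g ih =>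
    rw [grow_cons]
    by_cases hm : c + dx ∈ v
    · simp only [hm, if_pos]; exact ih _ _ h
    · simp only [hm, if_neg, not_false_iff]
      refine ih _ _ ?_
      simp only [List.nodup_append, List.nodup_cons, List.not_mem_nil, not_false_iff, List.nodup_nil, and_true, true_and]
      refine ⟨h, ?_⟩
      intro a ha b hb
      simp only [List.mem_singleton] at hb
      subst hb
      intro hab
      exact hm (hab ▸ ha)

theorem nodup_length_le (v : List Int) (hnd : v.Nodup) (hbd : ∀ x ∈ v, x.natAbs ≤ 2 ^ 62) :
    v.length ≤ 2 ^ 63 + 1 := by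
  have hcard : v.toFinset.card = v.length := List.toFinset_card_of_nodup hnd
  have hsub : v.toFinset ⊆ Finset.Icc (-(2 ^ 62) : ℤ) (2 ^ 62) := by
    intro x hx
    have := hbd x (List.mem_toFinset.1 hx)
    simp only [Finset.mem_Icc]
    omega
  have hle := Finset.card_le_card hsub
  rw [hcard] at hle
  have hIcc : (Finset.Icc (-(2 ^ 62) : ℤ) (2 ^ 62)).card = 2 ^ 63 + 1 := by
    rw [Int.card_Icc]
    decide
  omega

theorem zip_ones (l : List Int) :
    l.zip (List.replicate l.length (1 : Int)) = l.map (fun x => (x, 1)) := by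
  induction l with
  | nil => rfl
  | cons x t ih => simp [List.replicate_succ, ih]

-- keep-first dedup relative to already-seen elements
def kfAux (pre : List Int) : List Int → List Int
  | [] => []
  | c :: t => if c ∈ pre then kfAux pre t else c :: kfAux (pre ++ [c]) t

theorem ofList_eq_kfAux : ∀ (l pre : List Int), l.foldl PySem.Set.add pre = pre ++ kfAux pre l := by
  intro l
  induction l with
  | nil => intro pre; simp [kfAux]
  | cons c t ih =>
    intro pre
    by_cases h : c ∈ pre
    · have ha : PySem.Set.add pre c = pre := by
        simp [PySem.Set.add, PySem.Set.contains, h]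
      simp [kfAux, h, List.foldl_cons, ih pre]
    · simp [kfAux, h, List.foldl_cons, ih (pre ++ [c])]

theorem foldl_grow_dedup (graph : List Int) :
    ∀ (l : List Int) (s : List Int × List Int) (pre : List Int),
      (∀ c ∈ pre, ∀ dx ∈ graph, c + dx ∈ s.2) →
      l.foldl (fun s c => bfsGrow graph c s) s =
        (kfAux pre l).foldl (fun s c => bfsGrow graph c s) s := by
  intro l
  induction l with
  | nil => intro s pre _; rfl
  | cons c t ih =>
    intro s pre hpre
    obtain ⟨sn, sv⟩ := s
    by_cases h : c ∈ pre
    · have hidem : bfsGrow graph c (sn, sv) = (sn, sv) := grow_idem graph c sn sv (hpre c h)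
      simp only [kfAux, h, if_pos, List.foldl_cons, hidem]
      exact ih (sn, sv) pre hpre
    · simp only [kfAux, h, if_neg, not_false_iff, List.foldl_cons]
      refine ih (bfsGrow graph c (sn, sv)) (pre ++ [c]) ?_
      intro c2 hc2 dx hdx
      rcases List.mem_append.1 hc2 with h2 | h2
      · exact grow_mono graph c _ _ (hpre c2 h2 dx hdx)
      · simp only [List.mem_singleton] at h2
        subst h2
        exact grow_covers graph c2 hdx sn sv

theorem bfsLoopB_eq (graph : List Int) (depth : Int) (current visited : List Int) (level : Int) :
    bfsLoopB graph depth current visited level =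
      if current = [] ∨ depth ≤ level then visited
      else
        bfsLoopB graph depth
          (current.foldl (fun s c => bfsGrow graph c s) ([], visited)).1
          (current.foldl (fun s c => bfsGrow graph c s) ([], visited)).2 (level + 1) := by
  rw [bfsLoopB]

theorem bfsLoop_nil (graph : List Int) (depth : Int) (fuel : Nat) (v : List Int) :
    bfsLoop graph depth fuel [] v = v := by cases fuel <;> rfl

theorem bfsLoop_cons (graph : List Int) (depth c d : Int) (fuel : Nat)
    (q : List (Int × Int)) (v : List Int) :
    bfsLoop graph depth (fuel + 1) ((c, d) :: q) v =
      if depth ≤ d then v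
      else bfsLoop graph depth fuel (bfsStep graph c d (q, v)).1 (bfsStep graph c d (q, v)).2 := rfl

-- the main level-correspondence invariant: A's queue is always (rest of current level) ++ (next level so far)
theorem bfsLoop_level (graph : List Int) (depth : Int)
    (Hg : ∀ x ∈ graph, (x.natAbs : ℤ) ≤ 2 ^ 31) (Hdep : depth ≤ (2 ^ 31 : ℤ)) :
    ∀ (fuel : Nat) (rest n v : List Int) (d : Int),
      1 ≤ d →
      (∀ x ∈ rest, (x.natAbs : ℤ) ≤ d * 2 ^ 31) →
      (∀ x ∈ n, (x.natAbs : ℤ) ≤ (d + 1) * 2 ^ 31) →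
      (∀ x ∈ v, x.natAbs ≤ 2 ^ 62) →
      v.Nodup →
      rest.length + n.length + 2 * (2 ^ 63 + 1 - v.length) + 1 ≤ fuel →
      bfsLoop graph depth fuel
          (rest.map (fun x => (x, d)) ++ n.map (fun x => (x, d + 1))) v =
        if depth ≤ d then v
        else
          bfsLoopB graph depth
            (rest.foldl (fun s c => bfsGrow graph c s) (n, v)).1
            (rest.foldl (fun s c => bfsGrow graph c s) (n, v)).2 (d + 1) := by
  intro fuel
  induction fuel with
  | zero =>
    intro rest n v d _ _ _ _ _ Hfuel
    omega
  | succ f ih =>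
    intro rest n v d Hd Hrest Hn Hv Hnd Hfuel
    cases rest with
    | nil =>
      cases n with
      | nil =>
        simp only [List.map_nil, List.nil_append]
        rw [bfsLoop_nil]
        by_cases h0 : depth ≤ d
        · rw [if_pos h0]
        · rw [if_neg h0, List.foldl_nil, bfsLoopB_eq]
          simp
      | cons c cs =>
        simp only [List.map_nil, List.nil_append, List.map_cons]
        rw [bfsLoop_cons]
        by_cases h1 : depth ≤ d + 1
        · rw [if_pos h1]
          by_cases h0 : depth ≤ d
          · rw [if_pos h0]
          · rw [if_neg h0, List.foldl_nil, bfsLoopB_eq]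
            simp [h1]
        · have h0 : ¬ depth ≤ d := by omega
          rw [if_neg h1, step_spec]
          have hpair : bfsGrow graph c ([], v) =
              ((bfsGrow graph c ([], v)).1, (bfsGrow graph c ([], v)).2) := by
            exact Prod.mk.eta.symm
          set g1 := (bfsGrow graph c ([], v)).1 with hg1
          set v1 := (bfsGrow graph c ([], v)).2 with hv1
          have hlen : v1.length = g1.length + v.length := by
            have h := grow_len graph c [] v
            simp only [List.length_nil, Nat.add_zero] at h
            simpa [hg1, hv1] using h
          have hnd1 : v1.Nodup := grow_nodup graph c [] v Hnd
          have hc : (c.natAbs : ℤ) ≤ (d + 1) * 2 ^ 31 := Hn c (by simp)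
          have hdd : d + 2 ≤ 2 ^ 31 := by omega
          have hv1bd : ∀ x ∈ v1, x.natAbs ≤ 2 ^ 62 := by
            intro x hx
            rcases (grow_sub graph c [] v).2 x hx with h2 | ⟨dx, hdx, rfl⟩
            · exact Hv x h2
            · have hdx2 := Hg dx hdx
              have habs := Int.natAbs_add_le c dx
              omega
          have hg1bd : ∀ x ∈ g1, (x.natAbs : ℤ) ≤ (d + 1 + 1) * 2 ^ 31 := by
            intro x hx
            rcases (grow_sub graph c [] v).1 x hx with h2 | ⟨dx, hdx, rfl⟩
            · cases h2
            · have hdx2 := Hg dx hdx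
              have habs := Int.natAbs_add_le c dx
              omega
          have hK : v1.length ≤ 2 ^ 63 + 1 := nodup_length_le v1 hnd1 hv1bd
          clear_value g1 v1
          have hfuel2 : cs.length + g1.length + 2 * (2 ^ 63 + 1 - v1.length) + 1 ≤ f := by
            simp only [List.length_cons, List.length_nil] at Hfuel hlen
            omega
          rw [ih cs g1 v1 (d + 1) (by omega) (fun x hx => Hn x (by simp [hx])) hg1bd
            hv1bd hnd1 hfuel2, if_neg h1, if_neg h0, List.foldl_nil]
          conv_rhs => rw [bfsLoopB_eq]
          rw [if_neg (by simp [h1]), List.foldl_cons, hpair]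
    | cons r rs =>
      by_cases h0 : depth ≤ d
      · simp only [List.map_cons, List.cons_append]
        rw [bfsLoop_cons, if_pos h0, if_pos h0]
      · simp only [List.map_cons, List.cons_append]
        rw [bfsLoop_cons, if_neg h0, step_spec]
        have hpair : bfsGrow graph r (n, v) =
            ((bfsGrow graph r (n, v)).1, (bfsGrow graph r (n, v)).2) := by
          exact Prod.mk.eta.symm
        have hshift := grow_shift graph r n v
        set g1 := (bfsGrow graph r (n, v)).1 with hg1
        set v1 := (bfsGrow graph r (n, v)).2 with hv1
        have hlen : v1.length + n.length = g1.length + v.length := by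
          have h := grow_len graph r n v
          simpa [hg1, hv1] using h
        have hnd1 : v1.Nodup := grow_nodup graph r n v Hnd
        have hr : (r.natAbs : ℤ) ≤ d * 2 ^ 31 := Hrest r (by simp)
        have hdd : d + 1 ≤ 2 ^ 31 := by omega
        have hv1bd : ∀ x ∈ v1, x.natAbs ≤ 2 ^ 62 := by
          intro x hx
          rcases (grow_sub graph r n v).2 x hx with h2 | ⟨dx, hdx, rfl⟩
          · exact Hv x h2
          · have hdx2 := Hg dx hdx
            have habs := Int.natAbs_add_le r dx
            omega
        have hg1bd : ∀ x ∈ g1, (x.natAbs : ℤ) ≤ (d + 1) * 2 ^ 31 := by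
          intro x hx
          rcases (grow_sub graph r n v).1 x hx with h2 | ⟨dx, hdx, rfl⟩
          · exact Hn x h2
          · have hdx2 := Hg dx hdx
            have habs := Int.natAbs_add_le r dx
            omega
        have hK : v1.length ≤ 2 ^ 63 + 1 := nodup_length_le v1 hnd1 hv1bd
        have hm : v.length ≤ v1.length := by
          have h := grow_vis_mono graph r n v
          simpa [hv1] using h
        clear_value g1 v1
        have hfuel2 : rs.length + g1.length + 2 * (2 ^ 63 + 1 - v1.length) + 1 ≤ f := by
          simp only [List.length_cons] at Hfuel
          omega
        have hqueue :
            (rs.map (fun x => (x, d)) ++ n.map (fun x => (x, d + 1))) ++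
                (bfsGrow graph r ([], v)).1.map (fun x => (x, d + 1)) =
              rs.map (fun x => (x, d)) ++ g1.map (fun x => (x, d + 1)) := by
          rw [hg1, hshift]
          simp
        have hv1eq : (bfsGrow graph r ([], v)).2 = v1 := by
          rw [hv1, hshift]
        rw [hqueue, hv1eq]
        rw [ih rs g1 v1 d Hd (fun x hx => Hrest x (by simp [hx])) hg1bd hv1bd hnd1 hfuel2,
          if_neg h0, if_neg h0, List.foldl_cons, hpair]

-- ===== VERDICT (by name: the statement is the Claim_ definition above) =====
theorem ofList_ne_nil {l : List Int} (h : l ≠ []) : PySem.Set.ofList l ≠ [] := by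
  cases l with
  | nil => exact absurd rfl h
  | cons c t =>
    intro h2
    have : c ∈ PySem.Set.ofList (c :: t) := by
      rw [PySem.Set.mem_ofList]
      simp
    rw [h2] at this
    cases this

-- ===== VERDICT (by name: the statement is the Claim_ definition above) =====
theorem bfs_spec : Claim_equal_bfs := by
  intro graph depth hdom
  unfold Dom_bfs at hdom
  simp only [Bool.and_eq_true, List.all_eq_true, pvDomInt, decide_eq_true_eq] at hdom
  obtain ⟨hg, hd⟩ := hdom
  have Hg : ∀ x ∈ graph, (x.natAbs : ℤ) ≤ 2 ^ 31 := by
    intro x hx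
    have := hg x hx
    omega
  have Hdep : depth ≤ (2 ^ 31 : ℤ) := by omega
  show bfs graph depth = bfs_alt graph depth
  unfold bfs bfs_alt
  rw [zip_ones]
  have v0nd : (PySem.Set.ofList graph).Nodup := PySem.Set.nodup_ofList graph
  have v0bd : ∀ x ∈ PySem.Set.ofList graph, x.natAbs ≤ 2 ^ 62 := by
    intro x hx
    have hx2 : x ∈ graph := by rwa [PySem.Set.mem_ofList] at hx
    have := Hg x hx2
    omega
  have hmain := bfsLoop_level graph depth Hg Hdep (graph.length + 2 ^ 64 + 3) graph []
    (PySem.Set.ofList graph) 1 (le_refl 1)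
    (by intro x hx; have := Hg x hx; omega)
    (by intro x hx; cases hx)
    v0bd v0nd
    (by simp only [List.length_nil]; omega)
  simp only [List.map_nil, List.append_nil] at hmain
  rw [hmain]
  conv_rhs => rw [bfsLoopB_eq]
  by_cases h1 : depth ≤ 1
  · simp [h1]
  · rw [if_neg h1]
    by_cases hge : graph = []
    · subst hge
      have hnil : PySem.Set.ofList ([] : List Int) = [] := rfl
      rw [if_pos (Or.inl hnil)]
      rw [bfsLoopB_eq, if_pos (Or.inl (by simp))]
      simp
    · rw [if_neg (by simp [ofList_ne_nil hge, h1])]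
      have hof : PySem.Set.ofList graph = kfAux [] graph := by
        have h := ofList_eq_kfAux graph []
        rw [← PySem.Set.ofList_eq_foldl] at h
        simpa using h
      have hded := foldl_grow_dedup graph graph ([], PySem.Set.ofList graph) []
        (by intro c hc; cases hc)
      rw [hded, ← hof]
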